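-- pv_equiv track=rewrite | github.com/symphonic-navigator/chatsune | backend/modules/chat/_soft_cot_parser.py | _split_safe_and_tail
-- ===== SOURCE A (Python) =====
-- def _split_safe_and_tail(buffer: str, tags: tuple[str, ...]) -> tuple[str, str]:
--     """Split *buffer* into a safely-emittable prefix and a tail that might
--     still grow into any tag in *tags*.
--
--     The tail begins at the rightmost ``<`` character whose suffix is still a
--     prefix of at least one tag in *tags*. Everything before that ``<`` is
--     safe to flush immediately. If no such ``<`` exists, the entire buffer is
--     safe.
--     """
--     # Scan right-to-left for a ``<`` whose suffix can still become any tag.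
--     idx = buffer.rfind("<")
--     while idx != -1:
--         candidate = buffer[idx:]
--         if any(tag.startswith(candidate) for tag in tags):
--             return buffer[:idx], candidate
--         # This `<` is not a viable tag start; look for one further left.
--         idx = buffer.rfind("<", 0, idx)
--     return buffer, ""
-- ===== SOURCE B (Python) =====
-- def _split_safe_and_tail(buffer: str, tags: tuple[str, ...]) -> tuple[str, str]:
--     """Enumerate the known tag-prefix space instead of scanning buffer positions:
--     for each tag and each nonempty prefix p of it that starts with '<' and ends
--     the buffer, keep the shortest such p; split the buffer before it."""
--     best = None
--     for tag in tags:
--         for L in range(1, len(tag) + 1):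
--             p = tag[:L]
--             if p[0] == "<" and buffer.endswith(p) and (best is None or L < len(best)):
--                 best = p
--     if best is None:
--         return buffer, ""
--     return buffer[: len(buffer) - len(best)], best
-- ===== Notes on version B (the rewrite author's own statement) =====
-- stated objective: alternative
-- what changed: B enumerates the known tag-prefix space (each nonempty prefix of each tag starting with '<') and tests each as a buffer suffix via endswith, keeping the shortest match, instead of scanning the buffer's '<' positions right-to-left with rfind and testing startswith against every tag.
import Mathlib
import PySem

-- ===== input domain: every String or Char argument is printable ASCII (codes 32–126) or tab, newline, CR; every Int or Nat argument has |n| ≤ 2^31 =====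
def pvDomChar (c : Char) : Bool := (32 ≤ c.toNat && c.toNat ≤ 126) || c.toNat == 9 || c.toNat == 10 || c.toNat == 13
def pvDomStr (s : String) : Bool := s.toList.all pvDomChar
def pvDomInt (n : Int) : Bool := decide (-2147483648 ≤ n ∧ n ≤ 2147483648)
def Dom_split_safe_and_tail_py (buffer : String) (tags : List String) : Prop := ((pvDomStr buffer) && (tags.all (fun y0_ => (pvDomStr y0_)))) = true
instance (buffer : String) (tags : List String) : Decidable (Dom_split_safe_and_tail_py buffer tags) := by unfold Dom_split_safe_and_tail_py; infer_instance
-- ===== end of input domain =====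

-- B re-implements A by enumerating tag prefixes and testing them as buffer suffixes
-- (instead of scanning the buffer's '<' positions right-to-left); same cost class, alternative algorithm.

-- ===== PORT A =====
-- str.rfind("<", 0, hi) over a list of chars: greatest j < hi with P j (none = -1); exact for single-char needles.
def findTop (P : Nat → Bool) : Nat → Option Nat
  | 0 => none
  | hi+1 => if P hi then some hi else findTop P hi

theorem findTop_elim_le (P : Nat → Bool) (hi : Nat) : (findTop P hi).elim 0 (·+1) ≤ hi := by
  induction hi with
  | zero => simp [findTop]
  | succ k ih =>
    simp only [findTop]
    split
    · simp
    · omega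

-- buffer[j] == '<'
def ltAt (cs : List Char) (j : Nat) : Bool := cs[j]? == some '<'

-- the while loop of A; candidate = buffer[idx:], startswith = List.isPrefixOf (exact on lists of chars)
def loopA (buffer : String) (ts : List (List Char)) : Option Nat → String × String
  | none => (buffer, "")
  | some i =>
    let cand := buffer.toList.drop i
    if ts.any (fun t => cand.isPrefixOf t) then
      (String.mk (buffer.toList.take i), String.mk cand)
    else loopA buffer ts (findTop (ltAt buffer.toList) i)
  termination_by idx => idx.elim 0 (·+1)
  decreasing_by exact Nat.lt_succ_of_le (findTop_elim_le _ _)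

def split_safe_and_tail_py (buffer : String) (tags : List String) : String × String :=
  loopA buffer (tags.map String.toList) (findTop (ltAt buffer.toList) buffer.toList.length)

-- ===== PORT B =====
-- one candidate prefix p: keep it iff p[0]=='<' and buffer.endswith(p) and it is strictly shorter
-- than the best so far (endswith on a nonempty ASCII p = List.isSuffixOf, exact)
-- Python's `best is None or L < len(best)`
def better : Option (List Char) → List Char → Bool
  | none, _ => true
  | some b, p => decide (p.length < b.length)

def stepB (buf : List Char) (best : Option (List Char)) (p : List Char) : Option (List Char) :=
  if (p.head? == some '<') && p.isSuffixOf buf && better best p then some p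
  else best

def split_safe_and_tail_py_alt (buffer : String) (tags : List String) : String × String :=
  let buf := buffer.toList
  let best := (tags.map String.toList).foldl
      (fun best t => (List.range t.length).foldl (fun best L => stepB buf best (t.take (L+1))) best) none
  match best with
  | none => (buffer, "")
  | some p => (String.mk (buf.take (buf.length - p.length)), String.mk p)

-- ===== PRECONDITION & SPEC =====
def Spec_split_safe_and_tail_py (buffer : String) (tags : List String) (out : String × String) : Prop := out = split_safe_and_tail_py_alt buffer tags
instance (buffer : String) (tags : List String) (out : String × String) : Decidable (Spec_split_safe_and_tail_py buffer tags out) := by unfold Spec_split_safe_and_tail_py; infer_instance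

-- ===== CLAIM (what is proved, stated in full; the proofs are below) =====
def Claim_equal_split_safe_and_tail_py : Prop := ∀ (buffer : String) (tags : List String), Dom_split_safe_and_tail_py buffer tags → Spec_split_safe_and_tail_py buffer tags (split_safe_and_tail_py buffer tags)

-- ===== LEMMAS AND PROOFS =====

-- A's per-position test: buffer[j]=='<' and some tag starts with buffer[j:]
def combA (cs : List Char) (ts : List (List Char)) (j : Nat) : Bool :=
  ltAt cs j && ts.any (fun t => (cs.drop j).isPrefixOf t)

-- B's per-candidate test
def okB (buf p : List Char) : Bool := (p.head? == some '<') && p.isSuffixOf buf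

-- B's candidate space: every nonempty prefix of every tag
def cands (ts : List (List Char)) : List (List Char) :=
  ts.flatMap (fun t => (List.range t.length).map (fun L => t.take (L+1)))

theorem findTop_eq_none_iff (P : Nat → Bool) (hi : Nat) :
    findTop P hi = none ↔ ∀ j, j < hi → P j = false := by
  induction hi with
  | zero => simp [findTop]
  | succ k ih =>
    simp only [findTop]
    split
    · rename_i h
      constructor
      · intro h'; cases h'
      · intro h'; exact absurd h (by simp [h' k (Nat.lt_succ_self k)])
    · rename_i h
      rw [ih]
      constructor
      · intro h' j hj
        rcases Nat.lt_succ_iff_lt_or_eq.mp hj with hj | rfl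
        · exact h' j hj
        · simpa using h
      · intro h' j hj; exact h' j (Nat.lt_succ_of_lt hj)

theorem findTop_eq_some (P : Nat → Bool) (hi j : Nat) (h : findTop P hi = some j) :
    j < hi ∧ P j = true ∧ ∀ k, j < k → k < hi → P k = false := by
  induction hi with
  | zero => simp [findTop] at h
  | succ m ih =>
    simp only [findTop] at h
    split at h
    · rename_i hP
      cases h
      exact ⟨Nat.lt_succ_self _, hP, fun k hk hk' => by omega⟩
    · rename_i hP
      obtain ⟨h1, h2, h3⟩ := ih h
      refine ⟨Nat.lt_succ_of_lt h1, h2, fun k hk hk' => ?_⟩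
      rcases Nat.lt_succ_iff_lt_or_eq.mp hk' with hk'' | rfl
      · exact h3 k hk hk''
      · simpa using hP

theorem findTop_intro (P : Nat → Bool) (hi j : Nat) (h1 : j < hi) (h2 : P j = true)
    (h3 : ∀ k, j < k → k < hi → P k = false) : findTop P hi = some j := by
  induction hi with
  | zero => omega
  | succ m ih =>
    simp only [findTop]
    split
    · rename_i hP
      by_cases hj : j = m
      · rw [hj]
      · exact absurd hP (by simp [h3 m (by omega) (Nat.lt_succ_self m)])
    · rename_i hP
      have hj : j ≠ m := fun hh => hP (hh ▸ h2)
      exact ih (by omega) (fun k hk hk' => h3 k hk (by omega))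

theorem findTop_congr_below (P : Nat → Bool) (lo hi : Nat) (hle : lo ≤ hi)
    (h : ∀ j, lo ≤ j → j < hi → P j = false) : findTop P hi = findTop P lo := by
  induction hi with
  | zero => cases Nat.le_zero.mp hle; rfl
  | succ m ih =>
    by_cases hlo : lo = m + 1
    · rw [hlo]
    · have hle' : lo ≤ m := by omega
      simp only [findTop]
      rw [if_neg (by simp [h m hle' (Nat.lt_succ_self m)])]
      exact ih hle' (fun j hj hj' => h j hj (Nat.lt_succ_of_lt hj'))

-- characterization of A's loop: it returns the split at the greatest index passing combA below hi
theorem loopA_spec (buffer : String) (ts : List (List Char)) (hi : Nat) :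
    loopA buffer ts (findTop (ltAt buffer.toList) hi) =
      match findTop (combA buffer.toList ts) hi with
      | none => (buffer, "")
      | some i => (String.mk (buffer.toList.take i), String.mk (buffer.toList.drop i)) := by
  induction hi using Nat.strong_induction_on with
  | _ hi ih =>
    cases h : findTop (ltAt buffer.toList) hi with
    | none =>
      have : findTop (combA buffer.toList ts) hi = none := by
        rw [findTop_eq_none_iff] at h ⊢
        intro j hj
        simp [combA, h j hj]
      rw [this, loopA]
    | some i =>
      obtain ⟨h1, h2, h3⟩ := findTop_eq_some _ _ _ h
      rw [loopA]
      by_cases hc : ts.any (fun t => (buffer.toList.drop i).isPrefixOf t) = true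
      · rw [if_pos hc]
        have : findTop (combA buffer.toList ts) hi = some i := by
          apply findTop_intro _ _ _ h1
          · simp [combA, h2, hc]
          · intro k hk hk'
            simp [combA, h3 k hk hk']
        rw [this]
      · rw [if_neg hc]
        have hcongr : findTop (combA buffer.toList ts) hi = findTop (combA buffer.toList ts) i := by
          apply findTop_congr_below _ _ _ (Nat.le_of_lt h1)
          intro j hj hj'
          rcases Nat.lt_or_ge i j with hij | hij
          · simp [combA, h3 j hij hj']
          · have : j = i := by omega
            subst this
            simp only [combA, Bool.and_eq_false_iff]
            right
            simpa using hc
        rw [hcongr]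
        exact ih i h1

-- B's double fold is the fold of stepB over the flat candidate list
theorem foldB_eq_cands (buf : List Char) (ts : List (List Char)) (b0 : Option (List Char)) :
    ts.foldl (fun best t => (List.range t.length).foldl (fun best L => stepB buf best (t.take (L+1))) best) b0
      = (cands ts).foldl (stepB buf) b0 := by
  induction ts generalizing b0 with
  | nil => rfl
  | cons t ts ih =>
    simp only [cands, List.flatMap_cons, List.foldl_append, List.foldl_map, List.foldl_cons]
    rw [ih]
    rfl

theorem mem_cands_iff (ts : List (List Char)) (p : List Char) :
    p ∈ cands ts ↔ ∃ t ∈ ts, ∃ L, L < t.length ∧ p = t.take (L+1) := by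
  simp [cands, List.mem_flatMap, List.mem_map, List.mem_range, eq_comm]

-- a candidate passing okB is exactly a suffix of buf at a combA-position
theorem ok_cand_to_comb (buf : List Char) (ts : List (List Char)) (p : List Char)
    (hm : p ∈ cands ts) (hok : okB buf p = true) :
    1 ≤ p.length ∧ p.length ≤ buf.length ∧ p = buf.drop (buf.length - p.length) ∧
      combA buf ts (buf.length - p.length) = true := by
  simp only [okB, Bool.and_eq_true, beq_iff_eq, List.isSuffixOf_iff_suffix] at hok
  obtain ⟨hhead, hsuf⟩ := hok
  have hne : p ≠ [] := by intro h; rw [h] at hhead; simp at hhead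
  have hlen1 : 1 ≤ p.length := by cases p <;> simp_all
  have hlenle : p.length ≤ buf.length := hsuf.length_le
  have hdrop : p = buf.drop (buf.length - p.length) := List.suffix_iff_eq_drop.mp hsuf
  refine ⟨hlen1, hlenle, hdrop, ?_⟩
  rw [mem_cands_iff] at hm
  obtain ⟨t, ht, L, hL, hp⟩ := hm
  simp only [combA, Bool.and_eq_true]
  constructor
  · simp only [ltAt, beq_iff_eq]
    rw [← List.head?_drop, ← hdrop, hhead]
  · rw [List.any_eq_true]
    refine ⟨t, ht, ?_⟩
    rw [List.isPrefixOf_iff_prefix, ← hdrop, hp]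
    exact List.take_prefix _ _
  
-- a combA-position yields a candidate passing okB
theorem comb_to_ok_cand (buf : List Char) (ts : List (List Char)) (i : Nat)
    (hc : combA buf ts i = true) :
    i < buf.length ∧ buf.drop i ∈ cands ts ∧ okB buf (buf.drop i) = true := by
  simp only [combA, Bool.and_eq_true, ltAt, beq_iff_eq, List.any_eq_true] at hc
  obtain ⟨hget, t, ht, hpre⟩ := hc
  have hi : i < buf.length := by
    by_contra h
    rw [List.getElem?_eq_none (by omega)] at hget
    cases hget
  rw [List.isPrefixOf_iff_prefix] at hpre
  have hlen : (buf.drop i).length = buf.length - i := List.length_drop ..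
  have hlen1 : 1 ≤ (buf.drop i).length := by omega
  refine ⟨hi, ?_, ?_⟩
  · rw [mem_cands_iff]
    refine ⟨t, ht, (buf.drop i).length - 1, ?_, ?_⟩
    · have := hpre.length_le; omega
    · have : (buf.drop i).length - 1 + 1 = (buf.drop i).length := by omega
      rw [this]
      exact List.prefix_iff_eq_take.mp hpre
  · simp only [okB, Bool.and_eq_true, beq_iff_eq, List.isSuffixOf_iff_suffix]
    exact ⟨by rw [List.head?_drop]; exact hget, List.drop_suffix _ _⟩

-- the fold of stepB keeps a shortest okB element of the list (first one wins ties)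
theorem stepB_fold_spec (buf : List Char) (l : List (List Char)) (b0 : Option (List Char))
    (hb0 : ∀ q, b0 = some q → okB buf q = true) :
    (∀ q, l.foldl (stepB buf) b0 = some q → okB buf q = true ∧ (q ∈ l ∨ b0 = some q)) ∧
    (l.foldl (stepB buf) b0 = none → b0 = none ∧ ∀ p ∈ l, okB buf p = false) ∧
    (∀ q p, l.foldl (stepB buf) b0 = some q → (p ∈ l ∨ b0 = some p) → okB buf p = true →
      q.length ≤ p.length) := by
  induction l generalizing b0 with
  | nil =>
    refine ⟨fun q hq => ⟨hb0 q hq, Or.inr hq⟩, fun h => ⟨h, by simp⟩, ?_⟩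
    intro q p hq hp hok
    simp only [List.foldl_nil] at hq
    rcases hp with hp | hp
    · simp at hp
    · rw [hq] at hp; cases hp; exact le_refl _
  | cons x l ih =>
    simp only [List.foldl_cons]
    by_cases hcond : ((x.head? == some '<') && x.isSuffixOf buf && better b0 x) = true
    · -- step accepts x: new best = some x
      have hstep : stepB buf b0 x = some x := by unfold stepB; rw [if_pos hcond]
      rw [hstep]
      simp only [Bool.and_eq_true] at hcond
      have hokx : okB buf x = true := by simp [okB, hcond.1.1, hcond.1.2]
      obtain ⟨ih1, ih2, ih3⟩ := ih (some x) (fun q hq => by cases hq; exact hokx)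
      refine ⟨?_, ?_, ?_⟩
      · intro q hq
        obtain ⟨hok, hmem⟩ := ih1 q hq
        refine ⟨hok, ?_⟩
        rcases hmem with hm | hm
        · exact Or.inl (List.mem_cons_of_mem _ hm)
        · cases hm; exact Or.inl (List.mem_cons_self ..)
      · intro h
        exact absurd (ih2 h).1 (by simp)
      · intro q p hq hp hokp
        rcases hp with hp | hp
        · rcases List.mem_cons.mp hp with rfl | hp'
          · exact ih3 q p hq (Or.inr rfl) hokp
          · exact ih3 q p hq (Or.inl hp') hokp
        · -- p comes from b0 = some p; the accept condition gave x.length < p.length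
          have hxq := ih3 q x hq (Or.inr rfl) hokx
          have := hcond.2
          subst hp
          simp only [better, decide_eq_true_eq] at this
          omega
    · have hstep : stepB buf b0 x = b0 := by unfold stepB; rw [if_neg hcond]
      rw [hstep]
      obtain ⟨ih1, ih2, ih3⟩ := ih b0 hb0
      refine ⟨?_, ?_, ?_⟩
      · intro q hq
        obtain ⟨hok, hmem⟩ := ih1 q hq
        exact ⟨hok, hmem.imp (List.mem_cons_of_mem _) id⟩
      · intro h
        obtain ⟨hn, hall⟩ := ih2 h
        refine ⟨hn, fun p hp => ?_⟩
        rcases List.mem_cons.mp hp with rfl | hp'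
        · -- p rejected with b0 = none (better = true): okB p must be false
          subst hn
          cases hok : okB buf p with
          | false => rfl
          | true =>
            exfalso
            rw [Bool.not_eq_true, Bool.and_eq_false_iff, Bool.and_eq_false_iff] at hcond
            simp only [okB, Bool.and_eq_true] at hok
            rcases hcond with (h | h) | h
            · rw [hok.1] at h; cases h
            · rw [hok.2] at h; cases h
            · simp [better] at h
        · exact hall p hp'
      · intro q p hq hp hokp
        rcases hp with hp | hp
        · rcases List.mem_cons.mp hp with rfl | hp'
          · -- p rejected though okB: b0 = some b with b.length ≤ p.length
            cases hb : b0 with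
            | none =>
              subst hb
              rw [Bool.not_eq_true, Bool.and_eq_false_iff, Bool.and_eq_false_iff] at hcond
              simp only [okB, Bool.and_eq_true] at hokp
              rcases hcond with (h | h) | h
              · rw [hokp.1] at h; cases h
              · rw [hokp.2] at h; cases h
              · simp [better] at h
            | some b =>
              have hble := ih3 q b hq (Or.inr hb) (hb0 b hb)
              subst hb
              rw [Bool.not_eq_true, Bool.and_eq_false_iff, Bool.and_eq_false_iff] at hcond
              simp only [okB, Bool.and_eq_true] at hokp
              rcases hcond with (h | h) | h
              · rw [hokp.1] at h; cases h
              · rw [hokp.2] at h; cases h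
              · simp only [better, decide_eq_false_iff_not] at h
                omega
          · exact ih3 q p hq (Or.inl hp') hokp
        · exact ih3 q p hq (Or.inr hp) hokp

theorem split_eq (buffer : String) (tags : List String) :
    split_safe_and_tail_py buffer tags = split_safe_and_tail_py_alt buffer tags := by
  simp only [split_safe_and_tail_py, split_safe_and_tail_py_alt]
  rw [loopA_spec, foldB_eq_cands]
  set buf := buffer.toList with hbuf
  set ts := tags.map String.toList with hts
  obtain ⟨f1, f2, f3⟩ := stepB_fold_spec buf (cands ts) none (by intro q h; cases h)
  cases hA : findTop (combA buf ts) buf.length with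
  | none =>
    -- no combA position: no okB candidate either, so the fold yields none
    cases hB : (cands ts).foldl (stepB buf) none with
    | none => rfl
    | some q =>
      obtain ⟨hok, hmem⟩ := f1 q hB
      rcases hmem with hmem | hmem
      · obtain ⟨h1, h2, h3, h4⟩ := ok_cand_to_comb buf ts q hmem hok
        rw [findTop_eq_none_iff] at hA
        simp [hA (buf.length - q.length) (by omega)] at h4
      · cases hmem
  | some i =>
    obtain ⟨hi, hci, hmax⟩ := findTop_eq_some _ _ _ hA
    obtain ⟨hin, hcmem, hcok⟩ := comb_to_ok_cand buf ts i hci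
    cases hB : (cands ts).foldl (stepB buf) none with
    | none =>
      obtain ⟨_, hall⟩ := f2 hB
      exact absurd hcok (by simp [hall _ hcmem])
    | some q =>
      obtain ⟨hok, hmem⟩ := f1 q hB
      rcases hmem with hmem | hmem
      · obtain ⟨h1, h2, h3, h4⟩ := ok_cand_to_comb buf ts q hmem hok
        -- q is shortest, so its position j = n - q.length is ≥ i; maximality forces j = i
        have hqle : q.length ≤ (buf.drop i).length := f3 q (buf.drop i) hB (Or.inl hcmem) hcok
        have hdl : (buf.drop i).length = buf.length - i := List.length_drop ..
        have hji : buf.length - q.length = i := by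
          by_contra hne
          have := hmax (buf.length - q.length) (by omega) (by omega)
          rw [this] at h4
          cases h4
        have hqd : q = buf.drop i := by rw [hji] at h3; exact h3
        show (String.mk (buf.take i), String.mk (buf.drop i))
          = (String.mk (buf.take (buf.length - q.length)), String.mk q)
        rw [hji, hqd]
      · cases hmem

-- ===== VERDICT (by name: the statement is the Claim_ definition above) =====
theorem split_safe_and_tail_py_spec : Claim_equal_split_safe_and_tail_py := by
  intro buffer tags _
  unfold Spec_split_safe_and_tail_py
  exact split_eq buffer tags
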